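-- pv_equiv track=rewrite | github.com/dshemetov/leetcode | python/p04.py | p374
-- ===== SOURCE A (Python) =====
-- __pick__ = 6
--
-- def guess(num: int) -> int:
--     if num == __pick__:
--         return 0
--     if num > __pick__:
--         return -1
--     return 1
--
-- def p374(n: int) -> int:
--     """
--     374. Guess Number Higher or Lower https://leetcode.com/problems/guess-number-higher-or-lower/
--
--     Lessons learned:
--     - bisect_left has a 'key' argument as of 3.10.
--
--     Examples:
--     >>> p374(10)
--     6
--     """
--     lo, hi = 1, n
--     while lo < hi:
--         mid = (lo + hi) // 2
--         out = guess(mid)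
--         if out == 1:
--             lo = mid + 1
--         elif out == -1:
--             hi = mid - 1
--         else:
--             return mid
--
--     return lo
-- ===== SOURCE B (Python) =====
-- __pick__ = 6
--
-- def p374(n: int) -> int:
--     # A's binary search over [1, n] for the fixed module constant __pick__
--     # always converges to the pick clamped into the search range:
--     # below 1 the loop never runs (returns lo = 1), above __pick__ it finds
--     # the pick, and for 1 <= n < __pick__ it climbs to hi = n.
--     return max(1, min(n, __pick__))
-- ===== Notes on version B (the rewrite author's own statement) =====
-- stated objective: simpler
-- what changed: The binary search against the fixed module pick 6 is replaced by its closed form: the result is the pick clamped into [1, n], i.e. max(1, min(n, 6)); no loop and no guess calls remain.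
import Mathlib
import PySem

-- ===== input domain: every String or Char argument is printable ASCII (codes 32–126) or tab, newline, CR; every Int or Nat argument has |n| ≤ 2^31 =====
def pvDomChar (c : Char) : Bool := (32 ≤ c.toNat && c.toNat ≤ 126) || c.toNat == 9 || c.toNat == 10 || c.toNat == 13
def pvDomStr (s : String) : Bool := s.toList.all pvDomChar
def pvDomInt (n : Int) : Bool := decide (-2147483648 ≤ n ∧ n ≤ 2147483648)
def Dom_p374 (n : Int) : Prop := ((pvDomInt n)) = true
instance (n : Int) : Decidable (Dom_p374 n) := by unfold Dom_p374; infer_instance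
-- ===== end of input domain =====

-- B replaces the binary search against the fixed pick 6 by its closed form
-- max(1, min(n, 6)): simpler (one line, no loop, no guess calls).

-- ===== PORT A =====
def guessA (num : Int) : Int :=
  if num = 6 then 0
  else if num > 6 then -1
  else 1

-- the while loop of A, with its early `return mid` as the third branch
def p374Loop (lo hi : Int) : Int :=
  if h : lo < hi then
    let mid := PySem.Int.floordiv (lo + hi) 2
    let out := guessA mid
    if out = 1 then p374Loop (mid + 1) hi
    else if out = -1 then p374Loop lo (mid - 1)
    else mid
  else lo
termination_by (hi - lo).toNat
decreasing_by
  · have h2 : PySem.Int.floordiv (lo + hi) 2 = (lo + hi) / 2 :=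
      PySem.Int.floordiv_eq_ediv_of_pos (by omega)
    simp only [h2] at *; omega
  · have h2 : PySem.Int.floordiv (lo + hi) 2 = (lo + hi) / 2 :=
      PySem.Int.floordiv_eq_ediv_of_pos (by omega)
    simp only [h2] at *; omega

def p374 (n : Int) : Int := p374Loop 1 n

-- ===== PORT B =====
def p374_alt (n : Int) : Int := max 1 (min n 6)

-- ===== PRECONDITION & SPEC =====
def Spec_p374 (n : Int) (out : Int) : Prop := out = p374_alt n
instance (n : Int) (out : Int) : Decidable (Spec_p374 n out) := by unfold Spec_p374; infer_instance

-- ===== CLAIM (what is proved, stated in full; the proofs are below) =====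
def Claim_equal_p374 : Prop := ∀ (n : Int), Dom_p374 n → Spec_p374 n (p374 n)

-- ===== LEMMAS AND PROOFS =====

-- when the pick 6 lies in [lo, hi], the search finds it
theorem p374Loop_finds (k : Nat) (lo hi : Int) (hk : (hi - lo).toNat ≤ k)
    (h1 : lo ≤ 6) (h2 : 6 ≤ hi) : p374Loop lo hi = 6 := by
  induction k generalizing lo hi with
  | zero =>
    have : lo = 6 ∧ hi = 6 := by omega
    rw [p374Loop]; simp [this.1, this.2]
  | succ k ih =>
    rw [p374Loop]
    by_cases h : lo < hi
    · simp only [h, dif_pos]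
      have hmid : PySem.Int.floordiv (lo + hi) 2 = (lo + hi) / 2 :=
        PySem.Int.floordiv_eq_ediv_of_pos (by omega)
      simp only [hmid]
      set mid := (lo + hi) / 2 with hm
      have hb : lo ≤ mid ∧ mid < hi := by omega
      by_cases h6 : mid = 6
      · simp [guessA, h6]
      · by_cases hgt : mid > 6
        · simp only [guessA, h6, hgt]
          norm_num
          exact ih lo (mid - 1) (by omega) h1 (by omega)
        · simp only [guessA, h6, hgt]
          exact ih (mid + 1) hi (by omega) (by omega) h2
    · have hl : lo = 6 := by omega
      have hh : hi = 6 := by omega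
      simp [hl, hh]

-- when the whole range lies below the pick, the search climbs to hi
theorem p374Loop_climbs (k : Nat) (lo hi : Int) (hk : (hi - lo).toNat ≤ k)
    (h1 : lo ≤ hi) (h2 : hi < 6) : p374Loop lo hi = hi := by
  induction k generalizing lo with
  | zero =>
    have : lo = hi := by omega
    rw [p374Loop]; simp [this]
  | succ k ih =>
    rw [p374Loop]
    by_cases h : lo < hi
    · simp only [h, dif_pos]
      have hmid : PySem.Int.floordiv (lo + hi) 2 = (lo + hi) / 2 :=
        PySem.Int.floordiv_eq_ediv_of_pos (by omega)
      simp only [hmid]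
      set mid := (lo + hi) / 2 with hm
      have hb : lo ≤ mid ∧ mid < hi := by omega
      have h6 : ¬ mid = 6 := by omega
      have hgt : ¬ mid > 6 := by omega
      simp only [guessA, h6, hgt]
      exact ih (mid + 1) (by omega) (by omega)
    · have : lo = hi := by omega
      simp [this]

-- ===== VERDICT (by name: the statement is the Claim_ definition above) =====
theorem p374_spec : Claim_equal_p374 := by
  intro n _
  unfold Spec_p374 p374 p374_alt
  by_cases h6 : 6 ≤ n
  · rw [p374Loop_finds (n - 1).toNat 1 n (by omega) (by omega) h6]; omega
  · by_cases h1 : 1 ≤ n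
    · rw [p374Loop_climbs (n - 1).toNat 1 n (by omega) h1 (by omega)]; omega
    · rw [p374Loop, dif_neg (show ¬ (1:Int) < n by omega)]; omega
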